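-- pv_equiv track=rewrite | github.com/frankkramer-lab/REDCap_Quesionnaire_Manager | backend/routes/import_routes.py | parse_choices
-- ===== SOURCE A (Python) =====
-- def parse_choices(raw):
--     """Converts REDCap choice string into a dictionary."""
--     if not raw:
--         return None
--     result = {}
--     for entry in raw.split("|"):
--         parts = entry.strip().split(",", 1)
--         if len(parts) == 2:
--             key, value = parts
--             result[key.strip()] = value.strip()
--     return result
-- ===== SOURCE B (Python) =====
-- def parse_choices(raw):
--     """Converts REDCap choice string into a dictionary."""
--     if not raw:
--         return None
--     result = {}
--     key = []
--     val = []
--     in_val = False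
--     for ch in raw + "|":
--         if ch == "|":
--             if in_val:
--                 result["".join(key).strip()] = "".join(val).strip()
--             key = []
--             val = []
--             in_val = False
--         elif ch == "," and not in_val:
--             in_val = True
--         elif in_val:
--             val.append(ch)
--         else:
--             key.append(ch)
--     return result
-- ===== Notes on version B (the rewrite author's own statement) =====
-- stated objective: alternative
-- what changed: Replaced the nested split('|') / strip / split(',',1) traversal by a single left-to-right character scan (state machine with key/value buffers and an in-value flag) that builds the dict in one pass over the raw text.
import Mathlib
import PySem

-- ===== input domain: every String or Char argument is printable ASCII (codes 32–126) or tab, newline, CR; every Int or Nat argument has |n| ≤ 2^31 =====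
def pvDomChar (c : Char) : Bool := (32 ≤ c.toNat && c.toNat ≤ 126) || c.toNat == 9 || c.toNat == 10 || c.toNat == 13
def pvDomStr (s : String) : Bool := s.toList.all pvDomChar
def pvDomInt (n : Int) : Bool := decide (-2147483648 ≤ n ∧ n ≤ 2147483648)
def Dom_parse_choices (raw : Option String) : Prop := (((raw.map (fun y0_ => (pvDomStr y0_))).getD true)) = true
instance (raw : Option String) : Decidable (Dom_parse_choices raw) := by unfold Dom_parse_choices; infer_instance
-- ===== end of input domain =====

-- B replaces A's nested split('|')/split(',',1) traversal by a single-pass character scan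
-- (state machine with key/value buffers); alternative decomposition, same asymptotic cost.


-- ===== PORT A =====
-- one iteration of A's `for entry in raw.split("|")` loop body
def pcAstep (d : PySem.Dict (List Char) (List Char)) (e : List Char) :
    PySem.Dict (List Char) (List Char) :=
  match PySem.Chars.splitOnMax (PySem.Chars.strip e) [','] 1 with
  | [k, v] => d.insert (PySem.Chars.strip k) (PySem.Chars.strip v)
  | _ => d

def parse_choices (raw : Option String) : Option (List (String × String)) :=
  match raw with
  | none => none
  | some s =>
    if s.toList = [] then none
    else
      some ((((PySem.Chars.splitOn s.toList ['|']).foldl pcAstep PySem.Dict.empty).items).map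
        (fun p => (String.ofList p.1, String.ofList p.2)))

-- ===== PORT B =====
-- flush the buffers at a '|' boundary (B's `if in_val: result[...] = ...`)
def pcFlush (d : PySem.Dict (List Char) (List Char)) (key val : List Char) (inVal : Bool) :
    PySem.Dict (List Char) (List Char) :=
  if inVal then d.insert (PySem.Chars.strip key) (PySem.Chars.strip val) else d

-- one character of B's scan; state = (result, key buffer, value buffer, in_val flag)
def pcBstep (st : PySem.Dict (List Char) (List Char) × List Char × List Char × Bool)
    (ch : Char) : PySem.Dict (List Char) (List Char) × List Char × List Char × Bool :=
  match st with
  | (d, key, val, inVal) =>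
    if ch = '|' then (pcFlush d key val inVal, [], [], false)
    else if ch = ',' ∧ inVal = false then (d, key, val, true)
    else if inVal then (d, key, val ++ [ch], inVal)
    else (d, key ++ [ch], val, inVal)

def parse_choices_alt (raw : Option String) : Option (List (String × String)) :=
  match raw with
  | none => none
  | some s =>
    if s.toList = [] then none
    else
      some (((((s.toList ++ ['|']).foldl pcBstep
          (PySem.Dict.empty, [], [], false)).1).items).map
        (fun p => (String.ofList p.1, String.ofList p.2)))

-- ===== PRECONDITION & SPEC =====
def Spec_parse_choices (raw : Option String) (out : Option (List (String × String))) : Prop := out = parse_choices_alt raw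
instance (raw : Option String) (out : Option (List (String × String))) : Decidable (Spec_parse_choices raw out) := by unfold Spec_parse_choices; infer_instance

-- ===== CLAIM (what is proved, stated in full; the proofs are below) =====
def Claim_equal_parse_choices : Prop := ∀ (raw : Option String), Dom_parse_choices raw → Spec_parse_choices raw (parse_choices raw)

-- ===== LEMMAS AND PROOFS =====

def pcSegs : List Char → List Char × List (List Char)
  | [] => ([], [])
  | c :: rest =>
    let p := pcSegs rest
    if c = '|' then ([], p.1 :: p.2) else (c :: p.1, p.2)

theorem pcSplitOn_go_eq (l : List Char) : ∀ (fuel : Nat) (cur : List Char)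
    (acc : List (List Char)), l.length < fuel →
    PySem.Chars.splitOn.go ['|'] fuel l cur acc
      = acc.reverse ++ (cur.reverse ++ (pcSegs l).1) :: (pcSegs l).2 := by
  induction l with
  | nil =>
    intro fuel cur acc hf
    cases fuel with
    | zero => omega
    | succ f =>
      rw [PySem.Chars.splitOn.go]
      · simp [pcSegs]
      · omega
  | cons c rest ih =>
    intro fuel cur acc hf
    cases fuel with
    | zero => omega
    | succ f =>
      rw [PySem.Chars.splitOn.go]
      by_cases hc : c = '|'
      · subst hc
        rw [if_pos (by simp [List.isPrefixOf])]
        rw [show List.drop (['|'] : List Char).length ('|' :: rest) = rest from rfl]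
        rw [ih f [] (cur.reverse :: acc) (by simp at hf ⊢; omega)]
        simp [pcSegs]
      · rw [if_neg (by simp [List.isPrefixOf]; intro h; exact absurd h.symm hc)]
        rw [ih f (c :: cur) acc (by simp at hf ⊢; omega)]
        simp [pcSegs, hc]

theorem pcSplitOn_eq (l : List Char) :
    PySem.Chars.splitOn l ['|'] = (pcSegs l).1 :: (pcSegs l).2 := by
  rw [PySem.Chars.splitOn, pcSplitOn_go_eq l (l.length + 1) [] [] (by omega)]
  simp

theorem pcSegs_no_bar (a : List Char) (h : '|' ∉ a) : pcSegs a = (a, []) := by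
  induction a with
  | nil => rfl
  | cons c rest ih =>
    simp only [List.mem_cons, not_or] at h
    simp [pcSegs, Ne.symm h.1, ih h.2]

theorem pcSegs_append_bar (a rest : List Char) (h : '|' ∉ a) :
    pcSegs (a ++ '|' :: rest) = (a, (pcSegs rest).1 :: (pcSegs rest).2) := by
  induction a with
  | nil => simp [pcSegs]
  | cons c a' ih =>
    simp only [List.mem_cons, not_or] at h
    simp [pcSegs, List.cons_append, Ne.symm h.1, ih h.2]

theorem pcGoMax_zero (l cur : List Char) (acc : List (List Char)) (fuel : Nat) :
    PySem.Chars.splitOnMax.go [','] fuel 0 l cur acc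
      = ((cur.reverse ++ l) :: acc).reverse := by
  cases fuel with
  | zero => rw [PySem.Chars.splitOnMax.go]
  | succ f =>
    cases l with
    | nil =>
      rw [PySem.Chars.splitOnMax.go]
      · simp
      · omega
    | cons c rest =>
      rw [PySem.Chars.splitOnMax.go.eq_def]
      simp

theorem pcGoMax_no_comma (l : List Char) : ∀ (fuel : Nat) (cur : List Char)
    (acc : List (List Char)), l.length < fuel → ',' ∉ l →
    PySem.Chars.splitOnMax.go [','] fuel 1 l cur acc
      = ((cur.reverse ++ l) :: acc).reverse := by
  induction l with
  | nil =>
    intro fuel cur acc hf _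
    cases fuel with
    | zero => omega
    | succ f =>
      rw [PySem.Chars.splitOnMax.go]
      · simp
      · omega
  | cons c rest ih =>
    intro fuel cur acc hf hm
    simp only [List.mem_cons, not_or] at hm
    cases fuel with
    | zero => omega
    | succ f =>
      rw [PySem.Chars.splitOnMax.go]
      rw [if_neg (by omega)]
      rw [if_neg (by simp [List.isPrefixOf]; intro h; exact absurd h hm.1)]
      rw [ih f (c :: cur) acc (by simp at hf ⊢; omega) hm.2]
      simp

theorem pcSplitMax_no_comma (e : List Char) (h : ',' ∉ e) :
    PySem.Chars.splitOnMax e [','] 1 = [e] := by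
  rw [PySem.Chars.splitOnMax]
  rw [if_neg (by omega)]
  rw [show (1 : Int).toNat = 1 from rfl]
  rw [pcGoMax_no_comma e (e.length + 1) [] [] (by omega) h]
  simp

theorem pcGoMax_comma (k : List Char) : ∀ (fuel : Nat) (cur v : List Char)
    (acc : List (List Char)), k.length < fuel → ',' ∉ k →
    PySem.Chars.splitOnMax.go [','] fuel 1 (k ++ ',' :: v) cur acc
      = (v :: (cur.reverse ++ k) :: acc).reverse := by
  induction k with
  | nil =>
    intro fuel cur v acc hf _
    cases fuel with
    | zero => omega
    | succ f =>
      simp only [List.nil_append]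
      rw [PySem.Chars.splitOnMax.go]
      rw [if_neg (by omega)]
      rw [if_pos (by simp [List.isPrefixOf])]
      rw [show (1 : Nat) - 1 = 0 from rfl]
      rw [show List.drop ([','] : List Char).length (',' :: v) = v from rfl]
      rw [pcGoMax_zero]
      simp
  | cons c k' ih =>
    intro fuel cur v acc hf hm
    simp only [List.mem_cons, not_or] at hm
    cases fuel with
    | zero => omega
    | succ f =>
      rw [List.cons_append]
      rw [PySem.Chars.splitOnMax.go]
      rw [if_neg (by omega)]
      rw [if_neg (by simp [List.isPrefixOf]; intro h; exact absurd h hm.1)]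
      rw [ih f (c :: cur) v acc (by simp at hf ⊢; omega) hm.2]
      simp

theorem pcSplitMax_comma (k v : List Char) (h : ',' ∉ k) :
    PySem.Chars.splitOnMax (k ++ ',' :: v) [','] 1 = [k, v] := by
  rw [PySem.Chars.splitOnMax]
  rw [if_neg (by omega)]
  rw [show (1 : Int).toNat = 1 from rfl]
  rw [pcGoMax_comma k ((k ++ ',' :: v).length + 1) [] v [] (by simp) h]
  simp

theorem pcLstrip_append (k : List Char) (c : Char) (v : List Char)
    (hc : PySem.Chars.isspace c = false) :
    PySem.Chars.lstrip (k ++ c :: v) = PySem.Chars.lstrip k ++ c :: v := by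
  rw [PySem.Chars.lstrip, PySem.Chars.lstrip, List.dropWhile_append]
  by_cases h : (List.dropWhile PySem.Chars.isspace k).isEmpty
  · simp [h, List.isEmpty_iff.mp h, List.dropWhile_cons, hc]
  · simp [h]

theorem pcRstrip_append (k : List Char) (c : Char) (v : List Char)
    (hc : PySem.Chars.isspace c = false) :
    PySem.Chars.rstrip (k ++ c :: v) = k ++ c :: PySem.Chars.rstrip v := by
  rw [PySem.Chars.rstrip, PySem.Chars.rstrip]
  rw [show (k ++ c :: v).reverse = v.reverse ++ c :: k.reverse by simp]
  rw [List.dropWhile_append]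
  by_cases h : (List.dropWhile PySem.Chars.isspace v.reverse).isEmpty
  · simp [h, List.isEmpty_iff.mp h, List.dropWhile_cons, hc]
  · simp [h]

theorem pcStrip_split (k v : List Char) :
    PySem.Chars.strip (k ++ ',' :: v)
      = PySem.Chars.lstrip k ++ ',' :: PySem.Chars.rstrip v := by
  rw [PySem.Chars.strip, pcLstrip_append k ',' v (by decide),
    pcRstrip_append (PySem.Chars.lstrip k) ',' v (by decide)]

theorem pcLstrip_idem (k : List Char) :
    PySem.Chars.lstrip (PySem.Chars.lstrip k) = PySem.Chars.lstrip k := by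
  rw [PySem.Chars.lstrip, PySem.Chars.lstrip, List.dropWhile_idempotent]

theorem pcStrip_lstrip (k : List Char) :
    PySem.Chars.strip (PySem.Chars.lstrip k) = PySem.Chars.strip k := by
  rw [PySem.Chars.strip, PySem.Chars.strip, pcLstrip_idem]

theorem pcRstrip_cons (c : Char) (v : List Char) :
    PySem.Chars.rstrip (c :: v)
      = if PySem.Chars.rstrip v = [] then (if PySem.Chars.isspace c then [] else [c])
        else c :: PySem.Chars.rstrip v := by
  rw [PySem.Chars.rstrip, PySem.Chars.rstrip]
  rw [show (c :: v).reverse = v.reverse ++ [c] by simp]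
  rw [List.dropWhile_append]
  by_cases h : (List.dropWhile PySem.Chars.isspace v.reverse).isEmpty
  · rw [if_pos h, if_pos (by simp [List.isEmpty_iff.mp h])]
    by_cases hc : PySem.Chars.isspace c <;> simp [List.dropWhile, hc]
  · rw [if_neg h, if_neg (by simp_all [List.isEmpty_iff])]
    simp

theorem pcLstrip_rstrip_comm (v : List Char) :
    PySem.Chars.lstrip (PySem.Chars.rstrip v) = PySem.Chars.rstrip (PySem.Chars.lstrip v) := by
  induction v with
  | nil => rfl
  | cons c v ih =>
    rw [pcRstrip_cons]
    by_cases hc : PySem.Chars.isspace c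
    · have hl : PySem.Chars.lstrip (c :: v) = PySem.Chars.lstrip v := by
        simp [PySem.Chars.lstrip, List.dropWhile_cons, hc]
      by_cases h : PySem.Chars.rstrip v = []
      · rw [if_pos h, if_pos hc, hl, ← ih, h]
      · rw [if_neg h, hl, ← ih]
        have : PySem.Chars.lstrip (c :: PySem.Chars.rstrip v)
            = PySem.Chars.lstrip (PySem.Chars.rstrip v) := by
          simp [PySem.Chars.lstrip, List.dropWhile_cons, hc]
        rw [this]
    · have hc' : PySem.Chars.isspace c = false := by simpa using hc
      have hl : PySem.Chars.lstrip (c :: v) = c :: v := by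
        simp [PySem.Chars.lstrip, List.dropWhile_cons, hc']
      by_cases h : PySem.Chars.rstrip v = []
      · simp [h, hc', hl, pcRstrip_cons, PySem.Chars.lstrip, List.dropWhile_cons]
      · simp [h, hc', hl, pcRstrip_cons, PySem.Chars.lstrip, List.dropWhile_cons]

theorem pcRstrip_idem (v : List Char) :
    PySem.Chars.rstrip (PySem.Chars.rstrip v) = PySem.Chars.rstrip v := by
  simp only [PySem.Chars.rstrip, List.reverse_reverse, List.dropWhile_idempotent]

theorem pcStrip_rstrip (v : List Char) :
    PySem.Chars.strip (PySem.Chars.rstrip v) = PySem.Chars.strip v := by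
  rw [PySem.Chars.strip, PySem.Chars.strip, pcLstrip_rstrip_comm, pcRstrip_idem]

theorem pcMem_lstrip {c : Char} {l : List Char} (h : c ∈ PySem.Chars.lstrip l) : c ∈ l := by
  rw [PySem.Chars.lstrip] at h
  exact (List.dropWhile_sublist _).mem h

theorem pcMem_rstrip {c : Char} {l : List Char} (h : c ∈ PySem.Chars.rstrip l) : c ∈ l := by
  rw [PySem.Chars.rstrip] at h
  rw [List.mem_reverse] at h
  have := (List.dropWhile_sublist (l := l.reverse) (p := PySem.Chars.isspace)).mem h
  simpa using this

theorem pcMem_strip {c : Char} {l : List Char} (h : c ∈ PySem.Chars.strip l) : c ∈ l := by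
  rw [PySem.Chars.strip] at h
  exact pcMem_lstrip (pcMem_rstrip h)

theorem pcAstep_recon (d : PySem.Dict (List Char) (List Char)) (key val : List Char)
    (inVal : Bool) (hk : ',' ∉ key) :
    pcAstep d (key ++ if inVal then ',' :: val else []) = pcFlush d key val inVal := by
  cases inVal with
  | false =>
    simp only [pcAstep, pcFlush, Bool.false_eq_true, reduceIte, List.append_nil]
    rw [pcSplitMax_no_comma (PySem.Chars.strip key) (fun h => hk (pcMem_strip h))]
  | true =>
    simp only [pcAstep, pcFlush, reduceIte]
    rw [pcStrip_split,
      pcSplitMax_comma _ _ (fun h => hk (pcMem_lstrip h))]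
    simp [pcStrip_lstrip, pcStrip_rstrip]

theorem pcMain (cs : List Char) : ∀ (d : PySem.Dict (List Char) (List Char))
    (key val : List Char) (inVal : Bool), ',' ∉ key → '|' ∉ key → '|' ∉ val →
    (inVal = false → val = []) →
    ((cs ++ ['|']).foldl pcBstep (d, key, val, inVal)).1
      = (((pcSegs ((key ++ if inVal then ',' :: val else []) ++ cs)).1
            :: (pcSegs ((key ++ if inVal then ',' :: val else []) ++ cs)).2).foldl pcAstep d) := by
  induction cs with
  | nil =>
    intro d key val inVal hk hbk hbv hiv
    have hrec : '|' ∉ (key ++ if inVal then ',' :: val else []) := by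
      cases inVal <;> simp_all
    rw [List.append_nil, pcSegs_no_bar _ hrec]
    simp only [List.nil_append, List.foldl_cons, List.foldl_nil, List.foldl]
    rw [pcAstep_recon d key val inVal hk]
    simp [pcBstep]
  | cons c cs ih =>
    intro d key val inVal hk hbk hbv hiv
    by_cases hc : c = '|'
    · subst hc
      have hrec : '|' ∉ (key ++ if inVal then ',' :: val else []) := by
        cases inVal <;> simp_all
      rw [show ((key ++ if inVal then ',' :: val else []) ++ '|' :: cs)
            = (key ++ if inVal then ',' :: val else []) ++ '|' :: cs from rfl,
        pcSegs_append_bar _ cs hrec]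
      simp only [List.cons_append, List.foldl_cons]
      rw [show pcBstep (d, key, val, inVal) '|' = (pcFlush d key val inVal, [], [], false) by
        simp [pcBstep]]
      rw [ih (pcFlush d key val inVal) [] [] false (by simp) (by simp) (by simp) (fun _ => rfl)]
      simp only [List.foldl_cons]
      rw [pcAstep_recon d key val inVal hk]
      simp
    · by_cases h2 : c = ',' ∧ inVal = false
      · obtain ⟨hc2, hv2⟩ := h2
        subst hc2 hv2
        simp only [List.cons_append, List.foldl_cons]
        rw [show pcBstep (d, key, val, false) ',' = (d, key, val, true) by simp [pcBstep]]
        rw [ih d key val true hk hbk hbv (by simp)]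
        rw [hiv rfl]
        simp
      · cases inVal with
        | true =>
          simp only [List.cons_append, List.foldl_cons]
          rw [show pcBstep (d, key, val, true) c
              = (d, key, val ++ [c], true) by simp [pcBstep, hc]]
          rw [ih d key (val ++ [c]) true hk hbk (by
            intro h
            rcases List.mem_append.mp h with h | h
            · exact hbv h
            · exact hc (List.mem_singleton.mp h).symm) (by simp)]
          simp
        | false =>
          have hcc : ¬ c = ',' := fun h => h2 ⟨h, rfl⟩
          simp only [List.cons_append, List.foldl_cons]
          rw [show pcBstep (d, key, val, false) c
              = (d, key ++ [c], val, false) by simp [pcBstep, hc, hcc]]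
          rw [ih d (key ++ [c]) val false (by
            intro h
            rcases List.mem_append.mp h with h | h
            · exact hk h
            · exact hcc (List.mem_singleton.mp h).symm) (by
            intro h
            rcases List.mem_append.mp h with h | h
            · exact hbk h
            · exact hc (List.mem_singleton.mp h).symm) hbv hiv]
          simp

-- ===== VERDICT (by name: the statement is the Claim_ definition above) =====
theorem parse_choices_spec : Claim_equal_parse_choices := by
  intro raw _
  unfold Spec_parse_choices
  match raw with
  | none => rfl
  | some s =>
    simp only [parse_choices, parse_choices_alt]
    by_cases h : s.toList = []
    · simp [h]
    · simp only [h, if_neg h, reduceIte]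
      have := pcMain s.toList PySem.Dict.empty [] [] false (by simp) (by simp) (by simp) (fun _ => rfl)
      simp only [if_neg (Bool.false_ne_true), List.nil_append] at this
      rw [this, pcSplitOn_eq]
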